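-- pv_equiv track=rewrite | github.com/jadesym/interview | increment_till_equal/increment_till_equal.py | increment_using_sort
-- ===== SOURCE A (Python) =====
-- def increment_using_sort(array):
--     counts = {}
--     for val in array:
--         if val in counts: counts[val] += 1
--         else: counts[val] = 1
--     sortedVals = sorted(counts.keys())
--     lastVal = None
--     lastCount = 0
--     increments = 0
--     for index in range(len(sortedVals) - 1, -1, -1):
--         curVal = sortedVals[index]
--         curCount = counts[curVal]
--         if lastVal is not None:
--             increments += lastCount * (lastVal - curVal)
--         lastVal = curVal
--         lastCount += curCount
--     return increments
-- ===== SOURCE B (Python) =====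
-- def increment_using_sort(array):
--     if not array:
--         return 0
--     return sum(array) - len(array) * min(array)
-- ===== Notes on version B (the rewrite author's own statement) =====
-- stated objective: faster
-- what changed: Replaces the counting dict, sort of distinct values and descending accumulation loop with the closed form sum(array) - len(array)*min(array) computed in one pass.
import Mathlib
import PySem

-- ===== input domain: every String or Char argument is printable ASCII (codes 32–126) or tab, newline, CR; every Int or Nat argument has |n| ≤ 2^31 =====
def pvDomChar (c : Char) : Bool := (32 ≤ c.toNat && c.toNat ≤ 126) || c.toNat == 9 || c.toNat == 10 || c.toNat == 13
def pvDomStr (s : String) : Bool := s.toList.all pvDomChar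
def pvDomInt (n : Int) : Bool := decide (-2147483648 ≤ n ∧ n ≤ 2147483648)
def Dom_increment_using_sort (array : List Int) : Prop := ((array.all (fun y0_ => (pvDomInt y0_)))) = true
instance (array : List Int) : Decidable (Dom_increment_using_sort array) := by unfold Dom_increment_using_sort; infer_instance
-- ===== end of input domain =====

-- B replaces A's counting dict + sort + descending accumulation loop by the closed form
-- sum(array) - len(array)*min(array) (0 on empty), computed in one pass.

-- ===== PORT A =====
def increment_using_sort (array : List Int) : Int :=
  let counts : PySem.Dict Int Int :=
    array.foldl (fun counts val =>
      if counts.contains val then counts.modify val 0 (· + 1)   -- counts[val] += 1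
      else counts.insert val 1) PySem.Dict.empty
  let sortedVals := PySem.List.sorted counts.keys (fun x => x)
  let st := (PySem.List.pyRange ((sortedVals.length : Int) - 1) (-1) (-1)).foldl
    (fun st index =>
      let curVal := PySem.List.pyGetD sortedVals index 0   -- sortedVals[index]: index always in range here
      let curCount := counts.getD curVal 0                 -- counts[curVal]: key always present here
      ((some curVal : Option Int), st.2.1 + curCount,
        match st.1 with                                    -- st = (lastVal, lastCount, increments)
        | some lastVal => st.2.2 + st.2.1 * (lastVal - curVal)
        | none => st.2.2))
    ((none : Option Int), (0 : Int), (0 : Int))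
  st.2.2

-- ===== PORT B =====
def increment_using_sort_alt (array : List Int) : Int :=
  match PySem.List.min? array (fun x => x) with   -- min(array); none exactly when array is empty
  | none => 0
  | some m => array.sum - (array.length : Int) * m

-- ===== PRECONDITION & SPEC =====
def Spec_increment_using_sort (array : List Int) (out : Int) : Prop := out = increment_using_sort_alt array
instance (array : List Int) (out : Int) : Decidable (Spec_increment_using_sort array out) := by unfold Spec_increment_using_sort; infer_instance

-- ===== CLAIM (what is proved, stated in full; the proofs are below) =====
def Claim_equal_increment_using_sort : Prop := ∀ (array : List Int), Dom_increment_using_sort array → Spec_increment_using_sort array (increment_using_sort array)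

-- ===== LEMMAS AND PROOFS =====

-- A's counting loop builds exactly collections.Counter(array).
theorem pv_step_eq (d : PySem.Dict Int Int) (v : Int) :
    (if d.contains v then d.modify v 0 (· + 1) else d.insert v 1) = d.modify v 0 (· + 1) := by
  by_cases h : d.contains v
  · simp [h]
  · have hn : d.get? v = none := (PySem.Dict.get?_eq_none_iff_contains d v).2 (by simpa using h)
    simp [h, PySem.Dict.modify, PySem.Dict.getD, hn]

theorem pv_counts_eq (array : List Int) :
    array.foldl (fun counts val =>
      if counts.contains val then counts.modify val 0 (· + 1)
      else counts.insert val 1) PySem.Dict.empty = PySem.Dict.counter array := by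
  rw [PySem.Dict.counter_eq_foldl]
  congr 1
  funext d v
  exact pv_step_eq d v

-- The descending accumulation step of A, with the count lookup abstracted as c.
def pv_stepC (c : Int → Int) (st : Option Int × Int × Int) (u : Int) : Option Int × Int × Int :=
  ((some u : Option Int), st.2.1 + c u,
    match st.1 with
    | some lastVal => st.2.2 + st.2.1 * (lastVal - u)
    | none => st.2.2)

theorem pv_loop_some (c : Int → Int) (d : List Int) : ∀ (v lc inc : Int),
    (d.foldl (pv_stepC c) (some v, lc, inc)).2.2
      = inc + lc * (v - d.getLastD v)
        + (d.map (fun u => c u * (u - d.getLastD v))).sum := by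
  induction d with
  | nil => intro v lc inc; simp
  | cons u rest ih =>
    intro v lc inc
    simp only [List.foldl_cons, pv_stepC, List.getLastD_cons, List.map_cons, List.sum_cons]
    rw [ih]
    ring

theorem pv_loop_none (c : Int → Int) (d : List Int) :
    (d.foldl (pv_stepC c) (none, 0, 0)).2.2
      = (d.map (fun u => c u * (u - d.getLastD 0))).sum := by
  cases d with
  | nil => simp
  | cons u rest =>
    simp only [List.foldl_cons, pv_stepC, List.getLastD_cons, List.map_cons, List.sum_cons]
    rw [pv_loop_some]
    ring

-- A's result is the loop over the reversed sorted distinct values with c = multiplicity in array.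
theorem pv_portA_eq (array : List Int) :
    increment_using_sort array
      = (((PySem.List.sorted (PySem.Set.ofList array) (fun x => x)).reverse).foldl
          (pv_stepC (fun u => ((array.count u : Int)))) (none, 0, 0)).2.2 := by
  unfold increment_using_sort
  simp only [pv_counts_eq, PySem.Dict.keys_counter]
  have hr : PySem.List.pyRange
      (((PySem.List.sorted (PySem.Set.ofList array) (fun x => x)).length : Int) - 1) (-1) (-1)
      = (PySem.List.pyRange 0
          ((PySem.List.sorted (PySem.Set.ofList array) (fun x => x)).length : Int)).reverse := by
    rw [PySem.List.pyRange_neg_one_eq_reverse]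
    norm_num
  rw [hr]
  have hfun : (fun (st : Option Int × Int × Int) (index : Int) =>
      ((some (PySem.List.pyGetD (PySem.List.sorted (PySem.Set.ofList array) (fun x => x)) index 0) : Option Int),
        st.2.1 + (PySem.Dict.counter array).getD
          (PySem.List.pyGetD (PySem.List.sorted (PySem.Set.ofList array) (fun x => x)) index 0) 0,
        match st.1 with
        | some lastVal => st.2.2 + st.2.1 *
            (lastVal - PySem.List.pyGetD (PySem.List.sorted (PySem.Set.ofList array) (fun x => x)) index 0)
        | none => st.2.2))
      = fun st index => pv_stepC (fun u => ((array.count u : Int))) st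
          (PySem.List.pyGetD (PySem.List.sorted (PySem.Set.ofList array) (fun x => x)) index 0) := by
    funext st index
    simp only [pv_stepC, PySem.Dict.getD_counter]
  rw [hfun, ← List.foldl_map, List.map_reverse, PySem.List.map_pyGetD_pyRange_zero']

-- For any list of values A and any f: Σ_{x∈A} f x splits off all copies of u.
theorem pv_sum_split (A : List Int) (f : Int → Int) (u : Int) :
    (A.map f).sum = (A.count u : Int) * f u
      + ((A.filter (fun x => decide (x ≠ u))).map f).sum := by
  induction A with
  | nil => simp
  | cons a rest ih =>
    by_cases h : a = u
    · subst h
      simp only [List.map_cons, List.sum_cons, List.count_cons_self, List.filter_cons]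
      simp only [ne_eq, not_true_eq_false, decide_false]
      rw [ih]
      push_cast
      ring
    · rw [List.filter_cons_of_pos (by simpa using h), List.count_cons_of_ne h]
      simp only [List.map_cons, List.sum_cons, ih]
      ring

-- Summing c(u)*f(u) over the distinct values equals summing f over the whole array.
theorem pv_nodup_sum (f : Int → Int) : ∀ (l A : List Int), l.Nodup → (∀ x, x ∈ l ↔ x ∈ A) →
    (l.map (fun u => (A.count u : Int) * f u)).sum = (A.map f).sum := by
  intro l
  induction l with
  | nil =>
    intro A _ hmem
    have : A = [] := by
      cases A with
      | nil => rfl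
      | cons a t => exact absurd ((hmem a).2 (by simp)) (by simp)
    simp [this]
  | cons u t ih =>
    intro A hnd hmem
    have hndt : t.Nodup := hnd.of_cons
    have hut : u ∉ t := by
      have := hnd
      simp [List.nodup_cons] at this
      exact this.1
    have hmem' : ∀ x, x ∈ t ↔ x ∈ A.filter (fun x => decide (x ≠ u)) := by
      intro x
      constructor
      · intro hx
        have hxA : x ∈ A := (hmem x).1 (List.mem_cons_of_mem _ hx)
        have hxu : x ≠ u := fun h => hut (h ▸ hx)
        simp [List.mem_filter, hxA, hxu]
      · intro hx
        rw [List.mem_filter] at hx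
        have hxA : x ∈ A := hx.1
        have hxu : x ≠ u := by simpa using hx.2
        rcases List.mem_cons.1 ((hmem x).2 hxA) with h | h
        · exact absurd h hxu
        · exact h
    have hcnt : ∀ x ∈ t, ((A.filter (fun x => decide (x ≠ u))).count x : Int) = (A.count x : Int) := by
      intro x hx
      have hxu : x ≠ u := fun h => hut (h ▸ hx)
      rw [List.count_filter (by simpa using hxu)]
    calc ((u :: t).map (fun v => (A.count v : Int) * f v)).sum
        = (A.count u : Int) * f u + (t.map (fun v => (A.count v : Int) * f v)).sum := by
          simp
      _ = (A.count u : Int) * f u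
            + (t.map (fun v => ((A.filter (fun x => decide (x ≠ u))).count v : Int) * f v)).sum := by
          congr 1
          refine congrArg List.sum (List.map_congr_left ?_)
          intro x hx
          rw [hcnt x hx]
      _ = (A.count u : Int) * f u + ((A.filter (fun x => decide (x ≠ u))).map f).sum := by
          rw [ih _ hndt hmem']
      _ = (A.map f).sum := (pv_sum_split A f u).symm

theorem pv_sum_sub (A : List Int) (m : Int) :
    (A.map (fun x => x - m)).sum = A.sum - (A.length : Int) * m := by
  induction A with
  | nil => simp
  | cons a rest ih =>
    simp only [List.map_cons, List.sum_cons, List.length_cons, ih]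
    push_cast
    ring

theorem pv_head_eq_min (array : List Int) (m h : Int) (t : List Int)
    (hs : PySem.List.sorted (PySem.Set.ofList array) (fun x => x) = h :: t)
    (hm : PySem.List.min? array (fun x => x) = some m) : h = m := by
  have h1 : ∀ y ∈ PySem.Set.ofList array, h ≤ y := PySem.List.key_head_sorted_le _ _ hs
  have hmemh : h ∈ array := by
    have : h ∈ PySem.List.sorted (PySem.Set.ofList array) (fun x => x) := by
      rw [hs]; exact List.mem_cons_self
    rw [PySem.List.mem_sorted, PySem.Set.mem_ofList] at this
    exact this
  have h2 : h ≤ m := h1 m ((PySem.Set.mem_ofList _ _).2 (PySem.List.min?_mem hm))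
  have h3 : m ≤ h := PySem.List.min?_isMin hm h hmemh
  omega

-- ===== VERDICT (by name: the statement is the Claim_ definition above) =====
theorem increment_using_sort_spec : Claim_equal_increment_using_sort := by
  intro array _
  show increment_using_sort array = increment_using_sort_alt array
  rw [pv_portA_eq]
  cases hm : PySem.List.min? array (fun x => x) with
  | none =>
    have ha : array = [] := (PySem.List.min?_eq_none_iff _ _).1 hm
    subst ha
    decide
  | some m =>
    have ha : array ≠ [] := by
      intro h; subst h
      simp [PySem.List.min?] at hm
    cases hs : PySem.List.sorted (PySem.Set.ofList array) (fun x => x) with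
    | nil =>
      exfalso
      have hempty : PySem.Set.ofList array = [] := by
        have hp := PySem.List.sorted_perm (PySem.Set.ofList array) (fun x => x) false
        rw [hs] at hp
        exact (List.Perm.nil_eq hp).symm
      cases array with
      | nil => exact ha rfl
      | cons a t =>
        have h2 : a ∈ PySem.Set.ofList (a :: t) := (PySem.Set.mem_ofList _ _).2 (by simp)
        rw [hempty] at h2
        simp at h2
    | cons hd tl =>
      rw [pv_loop_none]
      have hlast : ((hd :: tl).reverse).getLastD 0 = hd := by
        rw [List.getLastD_eq_getLast?, List.getLast?_reverse]
        rfl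
      rw [hlast]
      have hrev : (((hd :: tl).reverse).map (fun u => (array.count u : Int) * (u - hd))).sum
          = (((hd :: tl)).map (fun u => (array.count u : Int) * (u - hd))).sum := by
        rw [List.map_reverse, List.sum_reverse]
      rw [hrev]
      have hnd : (hd :: tl).Nodup := by
        have hp := PySem.List.sorted_perm (PySem.Set.ofList array) (fun x => x) false
        rw [hs] at hp
        exact hp.symm.nodup (PySem.Set.nodup_ofList array)
      have hmem : ∀ x, x ∈ (hd :: tl) ↔ x ∈ array := by
        intro x
        rw [← hs, PySem.List.mem_sorted, PySem.Set.mem_ofList]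
      rw [pv_nodup_sum (fun x => x - hd) (hd :: tl) array hnd hmem, pv_sum_sub]
      rw [pv_head_eq_min array m hd tl hs hm]
      simp [increment_using_sort_alt, hm]
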